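-- pv_equiv track=rewrite | github.com/sergio-marti/qm3 | tools/autopar/autopar.py | guess_angl
-- ===== SOURCE A (Python) =====
-- def guess_angl( bond ):
-- 	angl = []
-- 	for i in range( len( bond ) - 1 ):
-- 		for j in range( i + 1, len( bond ) ):
-- 			if( bond[i][0] == bond[j][0] ):
-- 				angl.append( [ bond[i][1], bond[i][0], bond[j][1] ] )
-- 			elif( bond[i][0] == bond[j][1] ):
-- 				angl.append( [ bond[i][1], bond[i][0], bond[j][0] ] )
-- 			elif( bond[i][1] == bond[j][0] ):
-- 				angl.append( [ bond[i][0], bond[i][1], bond[j][1] ] )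
-- 			elif( bond[i][1] == bond[j][1] ):
-- 				angl.append( [ bond[i][0], bond[i][1], bond[j][0] ] )
-- 	return( angl )
-- ===== SOURCE B (Python) =====
-- def _merge(xs, ys):
--     # merge two strictly increasing index lists, dropping duplicates
--     out = []
--     i = j = 0
--     while i < len(xs) and j < len(ys):
--         x, y = xs[i], ys[j]
--         if x < y:
--             out.append(x); i += 1
--         elif y < x:
--             out.append(y); j += 1
--         else:
--             out.append(x); i += 1; j += 1
--     out.extend(xs[i:])
--     out.extend(ys[j:])
--     return out
--
-- def guess_angl(bond):
--     n = len(bond)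
--     if n < 2:
--         return []
--     idx = {}
--     for j in range(n):
--         idx.setdefault(bond[j][0], []).append(j)
--         if bond[j][1] != bond[j][0]:
--             idx.setdefault(bond[j][1], []).append(j)
--     angl = []
--     for i in range(n - 1):
--         a, b = bond[i][0], bond[i][1]
--         for j in _merge(idx.get(a, []), idx.get(b, [])):
--             if j > i:
--                 p, q = bond[j][0], bond[j][1]
--                 if a == p:
--                     angl.append([bond[i][1], a, q])
--                 elif a == q:
--                     angl.append([bond[i][1], a, p])
--                 elif b == p:
--                     angl.append([bond[i][0], b, q])
--                 else:
--                     angl.append([bond[i][0], b, p])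
--     return angl
-- ===== Notes on version B (the rewrite author's own statement) =====
-- stated objective: alternative
-- what changed: A compares every pair of bonds with a quadratic double loop; B builds a dictionary from atom to the increasing list of bond indices containing it, then for each bond merges its two per-atom index lists and visits only the later bonds that actually share an atom, keeping A's pair order and elif tie-breaking.
import Mathlib
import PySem

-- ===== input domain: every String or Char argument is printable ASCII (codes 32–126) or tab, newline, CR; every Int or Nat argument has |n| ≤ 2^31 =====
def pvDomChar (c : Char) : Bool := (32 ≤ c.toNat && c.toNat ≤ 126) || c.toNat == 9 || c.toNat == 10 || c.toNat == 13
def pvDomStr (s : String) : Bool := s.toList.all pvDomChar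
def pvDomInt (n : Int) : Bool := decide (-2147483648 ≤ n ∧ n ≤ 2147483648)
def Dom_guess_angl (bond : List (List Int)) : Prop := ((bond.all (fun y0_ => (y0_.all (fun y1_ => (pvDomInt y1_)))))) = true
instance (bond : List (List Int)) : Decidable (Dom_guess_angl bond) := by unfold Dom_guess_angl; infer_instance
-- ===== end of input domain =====

-- B replaces A's all-pairs double scan by a dictionary indexing bonds by atom, so each bond is
-- compared only with the later bonds that share an atom with it (objective: alternative).

-- bond[i][k], total via defaults (Pre_ excludes the inputs where Python raises IndexError)
def pvAt (bond : List (List Int)) (i k : Int) : Int :=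
  PySem.List.pyGetD (PySem.List.pyGetD bond i []) k 0

-- ===== PORT A =====
def guess_angl (bond : List (List Int)) : List (List Int) :=
  (PySem.List.pyRange 0 ((bond.length : Int) - 1) 1).foldl (fun angl i =>
    (PySem.List.pyRange (i + 1) (bond.length : Int) 1).foldl (fun angl j =>
      if pvAt bond i 0 == pvAt bond j 0 then
        angl ++ [[pvAt bond i 1, pvAt bond i 0, pvAt bond j 1]]
      else if pvAt bond i 0 == pvAt bond j 1 then
        angl ++ [[pvAt bond i 1, pvAt bond i 0, pvAt bond j 0]]
      else if pvAt bond i 1 == pvAt bond j 0 then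
        angl ++ [[pvAt bond i 0, pvAt bond i 1, pvAt bond j 1]]
      else if pvAt bond i 1 == pvAt bond j 1 then
        angl ++ [[pvAt bond i 0, pvAt bond i 1, pvAt bond j 0]]
      else angl) angl) []

-- ===== PORT B =====
-- merge two strictly increasing index lists, dropping duplicates (B's _merge)
def pvMerge : List Int → List Int → List Int
  | [], ys => ys
  | x :: xs, [] => x :: xs
  | x :: xs, y :: ys =>
    if x < y then x :: pvMerge xs (y :: ys)
    else if y < x then y :: pvMerge (x :: xs) ys
    else x :: pvMerge xs ys

-- idx: atom -> increasing list of indices of the bonds containing it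
def pvBuildIdx (bond : List (List Int)) : PySem.Dict Int (List Int) :=
  (PySem.List.pyRange 0 (bond.length : Int) 1).foldl (fun d j =>
    let d1 := d.modify (pvAt bond j 0) [] (· ++ [j])
    if pvAt bond j 1 ≠ pvAt bond j 0 then d1.modify (pvAt bond j 1) [] (· ++ [j]) else d1)
    PySem.Dict.empty

def guess_angl_alt (bond : List (List Int)) : List (List Int) :=
  if bond.length < 2 then []
  else
    let idx := pvBuildIdx bond
    (PySem.List.pyRange 0 ((bond.length : Int) - 1) 1).foldl (fun angl i =>
      let a := pvAt bond i 0
      let b := pvAt bond i 1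
      (pvMerge (idx.getD a []) (idx.getD b [])).foldl (fun angl j =>
        if i < j then
          let p := pvAt bond j 0
          let q := pvAt bond j 1
          if a == p then angl ++ [[pvAt bond i 1, a, q]]
          else if a == q then angl ++ [[pvAt bond i 1, a, p]]
          else if b == p then angl ++ [[pvAt bond i 0, b, q]]
          else angl ++ [[pvAt bond i 0, b, p]]
        else angl) angl) []

-- ===== PRECONDITION & SPEC =====
-- Pre_ excludes exactly the inputs where Python A raises IndexError: with at least two bonds,
-- every bond row must have at least two entries (with 0 or 1 bonds A touches nothing).
def Pre_guess_angl (bond : List (List Int)) : Prop :=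
  bond.length ≤ 1 ∨ ∀ b ∈ bond, 2 ≤ b.length
instance (bond : List (List Int)) : Decidable (Pre_guess_angl bond) := by
  unfold Pre_guess_angl; infer_instance

def pvWitness_guess_angl : List (List Int) := [[1, 2], [2, 3]]

def Spec_guess_angl (bond : List (List Int)) (out : List (List Int)) : Prop := out = guess_angl_alt bond
instance (bond : List (List Int)) (out : List (List Int)) : Decidable (Spec_guess_angl bond out) := by unfold Spec_guess_angl; infer_instance

-- ===== CLAIM (what is proved, stated in full; the proofs are below) =====
def Claim_equal_guess_angl : Prop := ∀ (bond : List (List Int)), Dom_guess_angl bond → Pre_guess_angl bond → Spec_guess_angl bond (guess_angl bond)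

-- ===== LEMMAS AND PROOFS =====

-- does bond j contain atom x?
def pvInc (bond : List (List Int)) (x j : Int) : Bool :=
  x == pvAt bond j 0 || x == pvAt bond j 1

-- the angle recorded for the pair (i, j) of bonds (B's unconditional 4-way branch)
def pvAng (bond : List (List Int)) (i j : Int) : List Int :=
  if pvAt bond i 0 == pvAt bond j 0 then [pvAt bond i 1, pvAt bond i 0, pvAt bond j 1]
  else if pvAt bond i 0 == pvAt bond j 1 then [pvAt bond i 1, pvAt bond i 0, pvAt bond j 0]
  else if pvAt bond i 1 == pvAt bond j 0 then [pvAt bond i 0, pvAt bond i 1, pvAt bond j 1]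
  else [pvAt bond i 0, pvAt bond i 1, pvAt bond j 0]

theorem pvMerge_nil_right (xs : List Int) : pvMerge xs [] = xs := by
  cases xs <;> simp [pvMerge]

theorem pvMerge_cons_left (x : Int) (xs ys : List Int) (h : ∀ y ∈ ys, x < y) :
    pvMerge (x :: xs) ys = x :: pvMerge xs ys := by
  cases ys with
  | nil => simp [pvMerge_nil_right]
  | cons y ys => simp [pvMerge, h y (by simp)]

theorem pvMerge_cons_right (y : Int) (xs ys : List Int) (h : ∀ x ∈ xs, y < x) :
    pvMerge xs (y :: ys) = y :: pvMerge xs ys := by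
  cases xs with
  | nil => simp [pvMerge]
  | cons x xs =>
    have hx : y < x := h x (by simp)
    simp [pvMerge, hx, not_lt_of_gt hx]

theorem pvMerge_filter (R : List Int) (hR : R.Pairwise (· < ·)) (p q : Int → Bool) :
    pvMerge (R.filter p) (R.filter q) = R.filter (fun j => p j || q j) := by
  induction R with
  | nil => simp [pvMerge]
  | cons r R ih =>
    rcases List.pairwise_cons.mp hR with ⟨hlt, hR'⟩
    have ih' := ih hR'
    cases hp : p r <;> cases hq : q r <;>
      simp only [List.filter_cons, hp, hq, Bool.false_or, Bool.true_or, Bool.or_self,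
        Bool.false_eq_true, if_true, if_false]
    · exact ih'
    · rw [pvMerge_cons_right r _ _ (fun x hx => hlt x (List.mem_of_mem_filter hx)), ih']
    · rw [pvMerge_cons_left r _ _ (fun y hy => hlt y (List.mem_of_mem_filter hy)), ih']
    · rw [pvMerge]; simp [ih']

theorem pvFlatMap_if_singleton {α β : Type} (l : List α) (p : α → Bool) (f : α → β) :
    l.flatMap (fun x => if p x then [f x] else []) = (l.filter p).map f := by
  induction l with
  | nil => rfl
  | cons x l ih => by_cases h : p x <;> simp [h, ih]

-- the built index: bonds containing x, in increasing order of index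
theorem pvIdxFold (bond : List (List Int)) (x : Int) (l : List Int)
    (d : PySem.Dict Int (List Int)) :
    (l.foldl (fun d j =>
      let d1 := d.modify (pvAt bond j 0) [] (· ++ [j])
      if pvAt bond j 1 ≠ pvAt bond j 0 then d1.modify (pvAt bond j 1) [] (· ++ [j]) else d1)
      d).getD x []
    = d.getD x [] ++ l.filter (pvInc bond x) := by
  induction l generalizing d with
  | nil => simp
  | cons j l ih =>
    rw [List.foldl_cons, ih, List.filter_cons]
    by_cases h10 : pvAt bond j 1 = pvAt bond j 0 <;>
      by_cases hx0 : x = pvAt bond j 0 <;> by_cases hx1 : x = pvAt bond j 1 <;>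
        simp [pvInc, PySem.Dict.getD_modify, h10, hx0, hx1] <;> simp_all

theorem pvBuildIdx_getD (bond : List (List Int)) (x : Int) :
    (pvBuildIdx bond).getD x [] =
      (PySem.List.pyRange 0 (bond.length : Int) 1).filter (pvInc bond x) := by
  unfold pvBuildIdx
  rw [pvIdxFold]
  simp

-- range(i+1, n) as a filter of range(0, n)
theorem pvRange_tail (n i : Int) (hi : 0 ≤ i) :
    PySem.List.pyRange (i + 1) n 1 =
      (PySem.List.pyRange 0 n 1).filter (fun j => decide (i < j)) := by
  by_cases hn : n ≤ i + 1
  · rw [PySem.List.pyRange_one_eq_nil hn, Eq.comm, List.filter_eq_nil_iff]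
    intro j hj
    rw [PySem.List.mem_pyRange_one] at hj
    simp only [decide_eq_true_eq]
    omega
  · rw [PySem.List.pyRange_one_append 0 (i + 1) n (by omega) (by omega), List.filter_append]
    have h1 : (PySem.List.pyRange 0 (i + 1) 1).filter (fun j => decide (i < j)) = [] := by
      rw [List.filter_eq_nil_iff]
      intro j hj
      rw [PySem.List.mem_pyRange_one] at hj
      simp only [decide_eq_true_eq]
      omega
    have h2 : (PySem.List.pyRange (i + 1) n 1).filter (fun j => decide (i < j)) =
        PySem.List.pyRange (i + 1) n 1 := by
      rw [List.filter_eq_self]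
      intro j hj
      rw [PySem.List.mem_pyRange_one] at hj
      simp only [decide_eq_true_eq]
      omega
    rw [h1, h2, List.nil_append]

-- A's inner loop over range(i+1, n)
theorem pvInnerA (bond : List (List Int)) (i : Int) (hi : 0 ≤ i) (angl : List (List Int)) :
    (PySem.List.pyRange (i + 1) (bond.length : Int) 1).foldl (fun angl j =>
      if pvAt bond i 0 == pvAt bond j 0 then
        angl ++ [[pvAt bond i 1, pvAt bond i 0, pvAt bond j 1]]
      else if pvAt bond i 0 == pvAt bond j 1 then
        angl ++ [[pvAt bond i 1, pvAt bond i 0, pvAt bond j 0]]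
      else if pvAt bond i 1 == pvAt bond j 0 then
        angl ++ [[pvAt bond i 0, pvAt bond i 1, pvAt bond j 1]]
      else if pvAt bond i 1 == pvAt bond j 1 then
        angl ++ [[pvAt bond i 0, pvAt bond i 1, pvAt bond j 0]]
      else angl) angl =
    angl ++ ((PySem.List.pyRange 0 (bond.length : Int) 1).filter
        (fun j => (pvInc bond (pvAt bond i 0) j || pvInc bond (pvAt bond i 1) j) && decide (i < j))).map
      (pvAng bond i) := by
  have hfun : (fun (angl : List (List Int)) (j : Int) =>
      if pvAt bond i 0 == pvAt bond j 0 then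
        angl ++ [[pvAt bond i 1, pvAt bond i 0, pvAt bond j 1]]
      else if pvAt bond i 0 == pvAt bond j 1 then
        angl ++ [[pvAt bond i 1, pvAt bond i 0, pvAt bond j 0]]
      else if pvAt bond i 1 == pvAt bond j 0 then
        angl ++ [[pvAt bond i 0, pvAt bond i 1, pvAt bond j 1]]
      else if pvAt bond i 1 == pvAt bond j 1 then
        angl ++ [[pvAt bond i 0, pvAt bond i 1, pvAt bond j 0]]
      else angl)
      = fun angl j => angl ++
        (if pvInc bond (pvAt bond i 0) j || pvInc bond (pvAt bond i 1) j
         then [pvAng bond i j] else []) := by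
    funext angl j
    by_cases c1 : pvAt bond i 0 = pvAt bond j 0 <;>
      by_cases c2 : pvAt bond i 0 = pvAt bond j 1 <;>
        by_cases c3 : pvAt bond i 1 = pvAt bond j 0 <;>
          by_cases c4 : pvAt bond i 1 = pvAt bond j 1 <;>
            simp [pvInc, pvAng, c1, c2, c3, c4] <;>
              (split_ifs <;> rfl)
  rw [hfun, PySem.List.foldl_append_eq_flatMap, pvFlatMap_if_singleton,
    pvRange_tail (bond.length : Int) i hi, List.filter_filter]

-- B's inner loop over the merged candidate list
theorem pvInnerB (bond : List (List Int)) (i : Int) (angl : List (List Int)) :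
    (pvMerge ((pvBuildIdx bond).getD (pvAt bond i 0) []) ((pvBuildIdx bond).getD (pvAt bond i 1) [])).foldl
      (fun angl j =>
        if i < j then
          if pvAt bond i 0 == pvAt bond j 0 then angl ++ [[pvAt bond i 1, pvAt bond i 0, pvAt bond j 1]]
          else if pvAt bond i 0 == pvAt bond j 1 then angl ++ [[pvAt bond i 1, pvAt bond i 0, pvAt bond j 0]]
          else if pvAt bond i 1 == pvAt bond j 0 then angl ++ [[pvAt bond i 0, pvAt bond i 1, pvAt bond j 1]]
          else angl ++ [[pvAt bond i 0, pvAt bond i 1, pvAt bond j 0]]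
        else angl) angl =
    angl ++ ((PySem.List.pyRange 0 (bond.length : Int) 1).filter
        (fun j => (pvInc bond (pvAt bond i 0) j || pvInc bond (pvAt bond i 1) j) && decide (i < j))).map
      (pvAng bond i) := by
  have hfun : (fun (angl : List (List Int)) (j : Int) =>
      if i < j then
        if pvAt bond i 0 == pvAt bond j 0 then angl ++ [[pvAt bond i 1, pvAt bond i 0, pvAt bond j 1]]
        else if pvAt bond i 0 == pvAt bond j 1 then angl ++ [[pvAt bond i 1, pvAt bond i 0, pvAt bond j 0]]
        else if pvAt bond i 1 == pvAt bond j 0 then angl ++ [[pvAt bond i 0, pvAt bond i 1, pvAt bond j 1]]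
        else angl ++ [[pvAt bond i 0, pvAt bond i 1, pvAt bond j 0]]
      else angl)
      = fun angl j => angl ++ (if decide (i < j) then [pvAng bond i j] else []) := by
    funext angl j
    by_cases h : i < j <;> simp [pvAng, h] <;> split_ifs <;> rfl
  rw [hfun, PySem.List.foldl_append_eq_flatMap, pvFlatMap_if_singleton,
    pvBuildIdx_getD, pvBuildIdx_getD,
    pvMerge_filter _ (PySem.List.pairwise_lt_pyRange_one 0 (bond.length : Int)) _ _,
    List.filter_filter]
  congr 2
  apply List.filter_congr
  intro j _
  exact Bool.and_comm _ _

-- ===== VERDICT (by name: the statement is the Claim_ definition above) =====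
theorem guess_angl_spec : Claim_equal_guess_angl := by
  intro bond _ _
  unfold Spec_guess_angl guess_angl guess_angl_alt
  by_cases h2 : bond.length < 2
  · rw [if_pos h2, PySem.List.pyRange_one_eq_nil (by omega : (bond.length : Int) - 1 ≤ 0)]
    rfl
  · rw [if_neg h2]
    apply PySem.List.foldl_congr_mem
    intro angl i hi
    rw [PySem.List.mem_pyRange_one] at hi
    rw [pvInnerA bond i hi.1 angl, pvInnerB bond i angl]
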